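-- pv_equiv track=rewrite | github.com/ilyalasy/memorization_circuits | filter/pattern_filter.py | is_repeated_text
-- ===== SOURCE A (Python) =====
-- def is_repeated_text(text, completion, similarity_threshold=0.8):
--     """Detect if completion is just repeating text from the input."""
--     # If the completion is very similar to the text
--     if not text or not completion:
--         return False
--
--     # Simple repetition check
--     if text.strip() == completion.strip():
--         return True
--
--     # Check if completion repeats a pattern from text
--     # Take segments from text and see if they appear in completion
--     words_text = text.split()
--     words_completion = completion.split()
--
--     if len(words_text) >= 3 and len(words_completion) >= 3:
--         # Check for repeated phrases (at least 3 words)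
--         for i in range(len(words_text) - 2):
--             phrase = ' '.join(words_text[i:i+3])
--             if phrase in ' '.join(words_completion):
--                 return True
--
--     # Check for line-by-line repetition patterns
--     text_lines = text.strip().split('\n')
--     completion_lines = completion.strip().split('\n')
--
--     if len(text_lines) > 0 and len(completion_lines) > 0:
--         # Get the pattern of the last few lines of text
--         pattern_lines = text_lines[-min(3, len(text_lines)):]
--         pattern = '\n'.join(pattern_lines)
--
--         # See if this pattern repeats in completion
--         completion_text = '\n'.join(completion_lines)
--         if pattern in completion_text:
--             return True
--
--     # Check for character-level patterns
--     # (e.g., repeating dots, repeating characters like in row_14344)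
--     if len(text) > 3 and len(completion) > 3:
--         # If text contains only one unique character repeated (ignoring whitespace)
--         text_chars = set(ch for ch in text if not ch.isspace())
--         completion_chars = set(ch for ch in completion if not ch.isspace())
--
--         if len(text_chars) == 1 and len(completion_chars) == 1 and text_chars == completion_chars:
--             return True
--
--     return False
-- ===== SOURCE B (Python) =====
-- def is_repeated_text(text, completion, similarity_threshold=0.8):
--     """Detect if completion is just repeating text from the input."""
--     if not text or not completion:
--         return False
--     t, c = text.strip(), completion.strip()
--     return (t == c
--             or _shares_trigram(text.split(), completion.split())
--             or _tail_lines_in(t, c)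
--             or _single_char_echo(text, completion))
--
--
-- def _shares_trigram(ws, cs):
--     # Index all 3-word phrases of the text in a hash set once, then slide a
--     # window over the joined completion (one scan per distinct phrase length)
--     # and test membership, instead of a substring search per phrase.
--     if len(ws) < 3 or len(cs) < 3:
--         return False
--     comp = ' '.join(cs)
--     pats = {' '.join(tri) for tri in zip(ws, ws[1:], ws[2:])}
--     n = len(comp)
--     for L in {len(p) for p in pats}:
--         for j in range(n - L + 1):
--             if comp[j:j+L] in pats:
--                 return True
--     return False
--
--
-- def _tail_lines_in(t, c):
--     # '\n'.join(x.split('\n')) == x, so the pattern is searched in c directly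
--     return '\n'.join(t.split('\n')[-3:]) in c
--
--
-- def _single_char_echo(text, completion):
--     if len(text) <= 3 or len(completion) <= 3:
--         return False
--     tns = [ch for ch in text if not ch.isspace()]
--     cns = [ch for ch in completion if not ch.isspace()]
--     return bool(tns) and bool(cns) and all(ch == tns[0] for ch in tns + cns)
-- ===== Notes on version B (the rewrite author's own statement) =====
-- stated objective: alternative
-- what changed: B inverts the phrase search: it indexes all 3-word phrases of the text in a hash set once and slides a window over the joined completion (one scan per distinct phrase length) testing set membership, instead of A's per-phrase substring search over the completion; the single-character check is an all-equal scan over the non-space characters instead of building and comparing character sets, and the line pattern is searched in completion.strip() directly instead of re-splitting and re-joining the completion.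
import Mathlib
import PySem

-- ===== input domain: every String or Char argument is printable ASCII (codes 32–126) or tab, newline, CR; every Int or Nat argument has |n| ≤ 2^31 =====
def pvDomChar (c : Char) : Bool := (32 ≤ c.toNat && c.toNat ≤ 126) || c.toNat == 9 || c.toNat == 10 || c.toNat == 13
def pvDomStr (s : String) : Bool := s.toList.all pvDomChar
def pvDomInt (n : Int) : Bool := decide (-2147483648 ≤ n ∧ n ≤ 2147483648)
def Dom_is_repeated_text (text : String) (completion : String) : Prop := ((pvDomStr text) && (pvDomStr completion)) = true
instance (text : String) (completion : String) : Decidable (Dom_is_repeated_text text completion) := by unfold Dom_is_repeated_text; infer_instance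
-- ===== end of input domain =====

-- B inverts the phrase search (hash set of the text's 3-word phrases + one window scan of the
-- joined completion per distinct phrase length, instead of a substring search per phrase),
-- checks the single-character case by an all-equal scan instead of building sets, and searches
-- the line pattern in completion.strip() directly; same return value on every input.

-- ===== PORT A =====
-- Literal port of A. x.split('\n') is (PySem.Str.split? x "\n").getD [] — exact, since
-- split? is none only for an empty separator.
def is_repeated_text (text : String) (completion : String) : Bool :=
  if text == "" || completion == "" then false
  else if PySem.Str.strip text == PySem.Str.strip completion then true
  else
    let words_text := PySem.Str.split₀ text
    let words_completion := PySem.Str.split₀ completion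
    -- for i in range(len(words_text)-2): if phrase in ' '.join(words_completion): return True
    if (3 ≤ words_text.length && 3 ≤ words_completion.length)
        && (PySem.List.pyRange 0 ((words_text.length : Int) - 2)).any (fun i =>
             PySem.Str.isIn (PySem.Str.join " " (PySem.List.slice words_text (some i) (some (i + 3))))
                            (PySem.Str.join " " words_completion)) then true
    else
      let text_lines := (PySem.Str.split? (PySem.Str.strip text) "\n").getD []
      let completion_lines := (PySem.Str.split? (PySem.Str.strip completion) "\n").getD []
      if (0 < text_lines.length && 0 < completion_lines.length)
          && (let pattern_lines := PySem.List.slice text_lines (some (-(min 3 (text_lines.length : Int)))) none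
              let pattern := PySem.Str.join "\n" pattern_lines
              let completion_text := PySem.Str.join "\n" completion_lines
              PySem.Str.isIn pattern completion_text) then true
      else
        if ((3 : Int) < PySem.Str.len text && (3 : Int) < PySem.Str.len completion)
            && (let text_chars := PySem.Set.ofList (text.toList.filter (fun ch => !PySem.Chars.isspace ch))
                let completion_chars := PySem.Set.ofList (completion.toList.filter (fun ch => !PySem.Chars.isspace ch))
                PySem.Set.len text_chars == 1 && PySem.Set.len completion_chars == 1
                  && PySem.Set.equal text_chars completion_chars) then true
        else false

-- ===== PORT B =====
-- Literal port of Source B's helper _shares_trigram: set of 3-word phrases, then one window scan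
-- of the joined completion per distinct phrase length, testing set membership.
def sharesTrigram (ws : List String) (cs : List String) : Bool :=
  if ws.length < 3 || cs.length < 3 then false
  else
    let comp := PySem.Str.join " " cs
    let pats := PySem.Set.ofList
      (((ws.zip (ws.drop 1)).zip (ws.drop 2)).map (fun tri => PySem.Str.join " " [tri.1.1, tri.1.2, tri.2]))
    let n := PySem.Str.len comp
    (PySem.Set.ofList (pats.map PySem.Str.len)).any (fun L =>
      (PySem.List.pyRange 0 (n - L + 1)).any (fun j =>
        PySem.Set.contains pats (PySem.Str.slice comp (some j) (some (j + L)))))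

-- Port of _tail_lines_in: '\n'.join(x.split('\n')) == x, so the pattern is searched in c directly.
def tailLinesIn (t : String) (c : String) : Bool :=
  PySem.Str.isIn (PySem.Str.join "\n" (PySem.List.slice ((PySem.Str.split? t "\n").getD []) (some (-3)) none)) c

-- Port of _single_char_echo: all non-space characters of both strings equal the first one of text.
def singleCharEcho (text : String) (completion : String) : Bool :=
  if PySem.Str.len text ≤ 3 || PySem.Str.len completion ≤ 3 then false
  else
    let tns := text.toList.filter (fun ch => !PySem.Chars.isspace ch)
    let cns := completion.toList.filter (fun ch => !PySem.Chars.isspace ch)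
    !tns.isEmpty && !cns.isEmpty && (tns ++ cns).all (fun ch => ch == tns.headD default)

def is_repeated_text_alt (text : String) (completion : String) : Bool :=
  if text == "" || completion == "" then false
  else
    let t := PySem.Str.strip text
    let c := PySem.Str.strip completion
    t == c
      || sharesTrigram (PySem.Str.split₀ text) (PySem.Str.split₀ completion)
      || tailLinesIn t c
      || singleCharEcho text completion

-- ===== PRECONDITION & SPEC =====
def Spec_is_repeated_text (text : String) (completion : String) (out : Bool) : Prop := out = is_repeated_text_alt text completion
instance (text : String) (completion : String) (out : Bool) : Decidable (Spec_is_repeated_text text completion out) := by unfold Spec_is_repeated_text; infer_instance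

-- ===== CLAIM (what is proved, stated in full; the proofs are below) =====
def Claim_equal_is_repeated_text : Prop := ∀ (text : String) (completion : String), Dom_is_repeated_text text completion → Spec_is_repeated_text text completion (is_repeated_text text completion)

-- ===== LEMMAS AND PROOFS =====

-- B's zipped 3-windows, phrased over take/drop.
theorem tri_aux (g : List String → Bool) : ∀ ws : List String,
    (List.range (ws.length - 2)).any (fun k => g (List.take 3 (List.drop k ws)))
      = ((ws.zip (ws.drop 1)).zip (ws.drop 2)).any (fun w => g [w.1.1, w.1.2, w.2]) := by
  intro ws
  induction ws with
  | nil => rfl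
  | cons a t ih =>
    cases t with
    | nil => rfl
    | cons b u =>
      cases u with
      | nil => rfl
      | cons c v =>
        have hlen : (a :: b :: c :: v).length - 2 = v.length + 1 := by simp
        have hl2 : (b :: c :: v).length - 2 = v.length := by simp
        rw [hl2] at ih
        rw [hlen, List.range_succ_eq_map]
        simp only [List.any_cons, List.any_map, Function.comp_def, List.drop_succ_cons,
          List.drop_zero, List.zip_cons_cons, List.take_succ_cons, List.take_zero]
        rw [ih]
        simp

-- Stage 1a: the indexed 3-word windows of A are the zipped windows of B.
theorem tri_window_eq (ws : List String) (comp : String) :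
    ((PySem.List.pyRange 0 ((ws.length : Int) - 2)).any (fun i =>
        PySem.Str.isIn (PySem.Str.join " " (PySem.List.slice ws (some i) (some (i + 3)))) comp))
      = ((ws.zip (ws.drop 1)).zip (ws.drop 2)).any (fun w =>
          PySem.Str.isIn (PySem.Str.join " " [w.1.1, w.1.2, w.2]) comp) := by
  rw [← tri_aux (fun l => PySem.Str.isIn (PySem.Str.join " " l) comp) ws]
  rcases Nat.lt_or_ge ws.length 2 with h | h
  · have h1 : ((ws.length : Int) - 2) ≤ 0 := by omega
    have h2 : ws.length - 2 = 0 := by omega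
    have : PySem.List.pyRange 0 ((ws.length : Int) - 2) = [] := by
      simp [PySem.List.pyRange]; omega
    rw [this, h2]
    rfl
  · have h1 : ((ws.length : Int) - 2) = ((ws.length - 2 : Nat) : Int) := by omega
    rw [h1, PySem.List.pyRange_zero_natCast, List.any_map]
    congr 1
    funext k
    have h3 : ((k : Int) + 3) = ((k : Int) + ((3 : Nat) : Int)) := by norm_num
    simp only [Function.comp_def, h3, PySem.List.slice_natCast_add]

-- Stage 1b: 'some phrase is a substring of comp' equals B's window scan over a set index:
-- substring occurrence at position j is exactly 'comp[j:j+L] in pats' for L the phrase length.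
theorem scan_eq (phr : List String) (comp : String) :
    phr.any (fun p => PySem.Str.isIn p comp)
      = (PySem.Set.ofList ((PySem.Set.ofList phr).map PySem.Str.len)).any (fun L =>
          (PySem.List.pyRange 0 (PySem.Str.len comp - L + 1)).any (fun j =>
            PySem.Set.contains (PySem.Set.ofList phr) (PySem.Str.slice comp (some j) (some (j + L))))) := by
  rw [Bool.eq_iff_iff]
  simp only [List.any_eq_true, PySem.Str.isIn_iff_infix, PySem.Set.mem_ofList, List.mem_map,
    PySem.List.mem_pyRange_one, PySem.Set.contains_iff]
  constructor
  · rintro ⟨p, hp, s, t, hst⟩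
    refine ⟨PySem.Str.len p, ⟨p, hp, rfl⟩, (s.length : Int), ?_, ?_⟩
    · have hlen : s.length + p.toList.length + t.length = comp.toList.length := by
        rw [← hst]; simp; omega
      have hlp : PySem.Str.len p = (p.toList.length : Int) := by
        simp [PySem.Str.len]
      have hlc : PySem.Str.len comp = (comp.toList.length : Int) := by
        simp [PySem.Str.len]
      rw [hlp, hlc]
      constructor <;> omega
    · have hslice : PySem.Str.slice comp (some (s.length : Int)) (some ((s.length : Int) + PySem.Str.len p)) = p := by
        have hlp : PySem.Str.len p = ((p.toList.length : Nat) : Int) := by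
          simp [PySem.Str.len]
        have h1 : (PySem.Str.slice comp (some (s.length : Int)) (some ((s.length : Int) + PySem.Str.len p))).toList
            = PySem.List.slice comp.toList (some (s.length : Int)) (some ((s.length : Int) + PySem.Str.len p)) := by
          simp [PySem.Str.toList_slice]
        rw [hlp] at h1
        rw [PySem.List.slice_natCast_add] at h1
        have h2 : (comp.toList.drop s.length).take p.toList.length = p.toList := by
          rw [← hst]
          simp [List.drop_append, List.take_append]
        rw [h2] at h1
        have := congrArg String.ofList h1
        rwa [String.ofList_toList, String.ofList_toList] at this
      rw [hslice]
      exact hp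
  · rintro ⟨L, ⟨p0, hp0, hL⟩, j, ⟨hj0, hjn⟩, hmem⟩
    refine ⟨_, hmem, ?_⟩
    have hL0 : 0 ≤ L := by
      rw [← hL]; simp [PySem.Str.len]
    have hjL : 0 ≤ j + L := by omega
    have htl : (PySem.Str.slice comp (some j) (some (j + L))).toList
        = (comp.toList.drop j.toNat).take ((j + L).toNat - j.toNat) := by
      simp only [PySem.Str.toList_slice, PySem.Chars.slice_eq_listSlice]
      rw [PySem.List.slice_toNat _ hj0 hjL]
    rw [htl]
    exact ((List.take_prefix _ _).isInfix).trans ((List.drop_suffix _ _).isInfix)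

-- Stage 1: A's guarded per-phrase substring search equals B's sharesTrigram.
theorem tri_eq (ws cs : List String) :
    ((3 ≤ ws.length && 3 ≤ cs.length)
        && (PySem.List.pyRange 0 ((ws.length : Int) - 2)).any (fun i =>
             PySem.Str.isIn (PySem.Str.join " " (PySem.List.slice ws (some i) (some (i + 3))))
                            (PySem.Str.join " " cs)))
      = sharesTrigram ws cs := by
  unfold sharesTrigram
  by_cases h1 : ws.length < 3
  · simp [h1]
  · by_cases h2 : cs.length < 3
    · simp [h1, h2]
    · have g1 : 3 ≤ ws.length := by omega
      have g2 : 3 ≤ cs.length := by omega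
      simp only [h1, h2, decide_true, g1, g2, if_false, Bool.or_self, Bool.or_false,
        decide_eq_true_eq]
      rw [tri_window_eq]
      have hmap : (((ws.zip (ws.drop 1)).zip (ws.drop 2)).map
            (fun tri => PySem.Str.join " " [tri.1.1, tri.1.2, tri.2])).any
              (fun p => PySem.Str.isIn p (PySem.Str.join " " cs))
          = ((ws.zip (ws.drop 1)).zip (ws.drop 2)).any (fun w =>
              PySem.Str.isIn (PySem.Str.join " " [w.1.1, w.1.2, w.2]) (PySem.Str.join " " cs)) := by
        simp [List.any_map, Function.comp_def]
      rw [← hmap, scan_eq]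
      simp

-- one-step reductions of splitOn.go (definitional).
theorem go_zero (sep l cur : List Char) (acc : List (List Char)) :
    PySem.Chars.splitOn.go sep 0 l cur acc = ((cur.reverse ++ l) :: acc).reverse := rfl

theorem go_nil (sep cur : List Char) (n : Nat) (acc : List (List Char)) :
    PySem.Chars.splitOn.go sep (n + 1) [] cur acc = (cur.reverse :: acc).reverse := rfl

theorem go_cons (sep cur : List Char) (n : Nat) (c : Char) (rest : List Char) (acc : List (List Char)) :
    PySem.Chars.splitOn.go sep (n + 1) (c :: rest) cur acc
      = if sep.isPrefixOf (c :: rest) = true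
          then PySem.Chars.splitOn.go sep n (List.drop sep.length (c :: rest)) [] (cur.reverse :: acc)
          else PySem.Chars.splitOn.go sep n rest (c :: cur) acc := rfl

-- splitOn.go never returns the empty list.
theorem splitOn_go_ne_nil (sep : List Char) : ∀ (fuel : Nat) (l cur : List Char) (acc : List (List Char)),
    PySem.Chars.splitOn.go sep fuel l cur acc ≠ [] := by
  intro fuel
  induction fuel with
  | zero => intro l cur acc; rw [go_zero]; simp
  | succ n ih =>
    intro l cur acc
    cases l with
    | nil => rw [go_nil]; simp
    | cons c rest =>
      rw [go_cons]
      split <;> apply ih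

theorem splitOn_ne_nil (s sep : List Char) : PySem.Chars.splitOn s sep ≠ [] := by
  rw [PySem.Chars.splitOn.eq_def]; exact splitOn_go_ne_nil sep _ s [] []

-- acc-framing for splitOn.go.
theorem splitOn_go_acc (sep : List Char) (hsep : sep ≠ []) : ∀ (fuel : Nat) (l cur : List Char) (acc : List (List Char)),
    l.length < fuel →
    PySem.Chars.splitOn.go sep fuel l cur acc = acc.reverse ++ PySem.Chars.splitOn.go sep fuel l cur [] := by
  intro fuel
  induction fuel with
  | zero => intro l cur acc h; omega
  | succ n ih =>
    intro l cur acc h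
    cases l with
    | nil =>
      rw [go_nil, go_nil]
      simp
    | cons c rest =>
      have hsl : 1 ≤ sep.length := List.length_pos_iff.mpr hsep
      rw [go_cons, go_cons]
      split
      · have hd : (List.drop sep.length (c :: rest)).length < n := by
          simp only [List.length_drop]
          simp only [List.length_cons] at h ⊢
          omega
        rw [ih _ _ _ hd, ih _ _ [List.reverse cur] hd]
        simp
      · have hr : rest.length < n := by simp only [List.length_cons] at h; omega
        rw [ih _ _ acc hr]

-- a one-step cons law for intercalate.
theorem intercalate_cons_ne_nil (sep x : List Char) (ys : List (List Char)) (h : ys ≠ []) :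
    sep.intercalate (x :: ys) = x ++ sep ++ sep.intercalate ys := by
  cases ys with
  | nil => simp at h
  | cons y t => simp [List.intercalate, List.intersperse]

-- joining splitOn.go back with the separator restores the input.
theorem splitOn_go_join (sep : List Char) (hsep : sep ≠ []) : ∀ (fuel : Nat) (l cur : List Char),
    l.length < fuel →
    sep.intercalate (PySem.Chars.splitOn.go sep fuel l cur []) = cur.reverse ++ l := by
  intro fuel
  induction fuel with
  | zero => intro l cur h; omega
  | succ n ih =>
    intro l cur h
    cases l with
    | nil =>
      rw [go_nil]
      simp [List.intercalate]
    | cons c rest =>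
      have hsl : 1 ≤ sep.length := List.length_pos_iff.mpr hsep
      rw [go_cons]
      split
      · next hpre =>
        have hd : (List.drop sep.length (c :: rest)).length < n := by
          simp only [List.length_drop]
          simp only [List.length_cons] at h ⊢
          omega
        rw [splitOn_go_acc sep hsep _ _ _ _ hd]
        simp only [List.reverse_cons, List.reverse_nil, List.nil_append, List.singleton_append]
        rw [intercalate_cons_ne_nil _ _ _ (splitOn_go_ne_nil sep _ _ _ _), ih _ _ hd]
        have : sep ++ List.drop sep.length (c :: rest) = c :: rest := by
          have hp : sep <+: (c :: rest) := List.isPrefixOf_iff_prefix.mp hpre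
          have := List.prefix_iff_eq_take.mp hp
          conv_rhs => rw [← List.take_append_drop sep.length (c :: rest)]
          rw [← this]
        simp [this]
      · have hr : rest.length < n := by simp only [List.length_cons] at h; omega
        rw [ih _ _ hr]
        simp

theorem join_splitOn (s sep : List Char) (hsep : sep ≠ []) :
    PySem.Chars.join sep (PySem.Chars.splitOn s sep) = s := by
  rw [PySem.Chars.join.eq_1, PySem.Chars.splitOn.eq_def]
  simpa using splitOn_go_join sep hsep (s.length + 1) s [] (by omega)

-- x.split('\n') at the Chars level.
theorem split_nl (t : String) :
    (PySem.Str.split? t "\n").getD [] = (PySem.Chars.splitOn t.toList ['\n']).map String.ofList := by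
  rw [PySem.Str.split?.eq_1, PySem.Chars.split?.eq_1]
  rfl

-- '\n'.join(x.split('\n')) == x.
theorem join_split_nl (c : String) :
    PySem.Str.join "\n" ((PySem.Str.split? c "\n").getD []) = c := by
  rw [split_nl, PySem.Str.join.eq_1]
  have h0 : ("\n" : String).toList = ['\n'] := rfl
  have h1 : List.map String.toList (List.map String.ofList (PySem.Chars.splitOn c.toList ['\n']))
      = PySem.Chars.splitOn c.toList ['\n'] := by
    simp [List.map_map, Function.comp_def, String.toList_ofList]
  rw [h1, h0, join_splitOn c.toList ['\n'] (by simp), String.ofList_toList]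

-- Stage 2: A's guarded pattern check equals B's direct one.
theorem line_check_eq (t c : String) :
    ((0 < ((PySem.Str.split? t "\n").getD []).length && 0 < ((PySem.Str.split? c "\n").getD []).length)
      && PySem.Str.isIn
           (PySem.Str.join "\n" (PySem.List.slice ((PySem.Str.split? t "\n").getD [])
             (some (-(min 3 (((PySem.Str.split? t "\n").getD []).length : Int)))) none))
           (PySem.Str.join "\n" ((PySem.Str.split? c "\n").getD [])))
      = tailLinesIn t c := by
  unfold tailLinesIn
  have htl : ((PySem.Str.split? t "\n").getD []).length ≠ 0 := by
    rw [split_nl]; simpa using splitOn_ne_nil t.toList ['\n']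
  have hcl : ((PySem.Str.split? c "\n").getD []).length ≠ 0 := by
    rw [split_nl]; simpa using splitOn_ne_nil c.toList ['\n']
  set tl := (PySem.Str.split? t "\n").getD [] with htl_def
  have hmin : (min 3 ((tl.length : Int))) = (((min 3 tl.length : Nat)) : Int) := by
    simp [Nat.cast_min]
  have hslice : PySem.List.slice tl (some (-(min 3 ((tl.length : Int))))) none
      = PySem.List.slice tl (some (-3)) none := by
    rw [hmin, PySem.List.slice_from_neg_natCast tl (min 3 tl.length) (by omega),
        PySem.List.slice_from_neg_ofNat tl 3 (by omega)]
    congr 1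
    omega
  rw [hslice, join_split_nl c]
  have h1 : (0 < tl.length) := by omega
  have h2 : (0 < ((PySem.Str.split? c "\n").getD []).length) := by omega
  simp [h1, h2]

-- a Nodup list whose members are exactly {a} is [a].
theorem singleton_of_nodup {α : Type} (l : List α) (a : α) (hnd : l.Nodup) (ha : a ∈ l)
    (hu : ∀ b ∈ l, b = a) : l = [a] := by
  cases l with
  | nil => simp at ha
  | cons h t =>
    have hh : h = a := hu h (by simp)
    have ht : t = [] := by
      cases t with
      | nil => rfl
      | cons x u =>
        have hx : x = a := hu x (by simp)
        rw [List.nodup_cons] at hnd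
        exact absurd (by simp [hh, hx] : h ∈ x :: u) hnd.1
    simp [hh, ht]

-- Stage 3a: 'both char sets are the singleton of the same element' is an all-equal scan.
theorem char_sets_eq (xs ys : List Char) :
    (PySem.Set.len (PySem.Set.ofList xs) == 1 && PySem.Set.len (PySem.Set.ofList ys) == 1
        && PySem.Set.equal (PySem.Set.ofList xs) (PySem.Set.ofList ys))
      = (!xs.isEmpty && !ys.isEmpty && (xs ++ ys).all (fun ch => ch == xs.headD default)) := by
  rw [Bool.eq_iff_iff]
  simp only [Bool.and_eq_true, beq_iff_eq, PySem.Set.equal_iff, PySem.Set.mem_ofList,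
    Bool.not_eq_eq_eq_not, Bool.not_true, List.isEmpty_eq_false_iff, List.all_eq_true,
    List.mem_append]
  have hlen : ∀ zs : List Char, PySem.Set.len (PySem.Set.ofList zs) = 1
      ↔ ∃ a, PySem.Set.ofList zs = [a] := by
    intro zs
    have : PySem.Set.len (PySem.Set.ofList zs) = ((PySem.Set.ofList zs).length : Int) := by
      simp [PySem.Set.len, PySem.List.len]
    rw [this]
    rw [show ((1 : Int) = ((1 : Nat) : Int)) from rfl, Nat.cast_inj]
    exact List.length_eq_one_iff
  constructor
  · rintro ⟨⟨hx, hy⟩, hmem⟩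
    rw [hlen] at hx hy
    obtain ⟨a, ha⟩ := hx
    obtain ⟨b, hb⟩ := hy
    have hxa : ∀ z, z ∈ xs ↔ z = a := by
      intro z
      rw [← PySem.Set.mem_ofList (xs := xs), ha]; simp
    have hyb : ∀ z, z ∈ ys ↔ z = b := by
      intro z
      rw [← PySem.Set.mem_ofList (xs := ys), hb]; simp
    have hax : a ∈ xs := (hxa a).mpr rfl
    have hby : b ∈ ys := (hyb b).mpr rfl
    have hxne : xs ≠ [] := by rintro rfl; simp at hax
    have hhead : xs.headD default = a := by
      have : xs.headD default ∈ xs := by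
        cases xs with
        | nil => simp at hxne
        | cons h t => simp
      exact (hxa _).mp this
    have hba : b = a := (hxa b).mp ((hmem b).mpr hby)
    refine ⟨⟨hxne, by rintro rfl; simp at hby⟩, ?_⟩
    rintro z (hz | hz)
    · rw [hhead]; exact (hxa z).mp hz
    · rw [hhead]; rw [← hba]; exact (hyb z).mp hz
  · rintro ⟨⟨hxne, hyne⟩, hall⟩
    set a := xs.headD default with ha_def
    have hax : a ∈ xs := by
      cases xs with
      | nil => simp at hxne
      | cons h t => simp [ha_def]
    have hxa : ∀ z ∈ xs, z = a := fun z hz => hall z (Or.inl hz)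
    have hya : ∀ z ∈ ys, z = a := fun z hz => hall z (Or.inr hz)
    have hay : a ∈ ys := by
      cases ys with
      | nil => simp at hyne
      | cons h t => have := hya h (by simp); simp [← this]
    have hsx : PySem.Set.ofList xs = [a] :=
      singleton_of_nodup _ a (PySem.Set.nodup_ofList xs) ((PySem.Set.mem_ofList _ _).mpr hax)
        (fun b hb => hxa b ((PySem.Set.mem_ofList _ _).mp hb))
    have hsy : PySem.Set.ofList ys = [a] :=
      singleton_of_nodup _ a (PySem.Set.nodup_ofList ys) ((PySem.Set.mem_ofList _ _).mpr hay)
        (fun b hb => hya b ((PySem.Set.mem_ofList _ _).mp hb))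
    refine ⟨⟨(hlen xs).mpr ⟨a, hsx⟩, (hlen ys).mpr ⟨a, hsy⟩⟩, ?_⟩
    intro z
    constructor
    · intro hz; rw [hxa z hz]; exact hay
    · intro hz; rw [hya z hz]; exact hax

-- len(s) as a cast of the Nat length.
theorem str_len_eq (s : String) : PySem.Str.len s = (s.length : Int) := by simp

-- Stage 3: A's guarded set check equals B's singleCharEcho.
theorem char_eq (text completion : String) :
    (((3 : Int) < PySem.Str.len text && (3 : Int) < PySem.Str.len completion)
        && (PySem.Set.len (PySem.Set.ofList (text.toList.filter (fun ch => !PySem.Chars.isspace ch))) == 1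
            && PySem.Set.len (PySem.Set.ofList (completion.toList.filter (fun ch => !PySem.Chars.isspace ch))) == 1
            && PySem.Set.equal (PySem.Set.ofList (text.toList.filter (fun ch => !PySem.Chars.isspace ch)))
                               (PySem.Set.ofList (completion.toList.filter (fun ch => !PySem.Chars.isspace ch)))))
      = singleCharEcho text completion := by
  unfold singleCharEcho
  by_cases h1 : text.length ≤ 3
  · have hn : ¬ 3 < text.length := by omega
    simp [str_len_eq, h1, hn]
  · by_cases h2 : completion.length ≤ 3
    · have hn : ¬ 3 < completion.length := by omega
      simp [str_len_eq, h2, hn]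
    · have ht : ¬ PySem.Str.len text ≤ 3 := by rw [str_len_eq]; omega
      have hc : ¬ PySem.Str.len completion ≤ 3 := by rw [str_len_eq]; omega
      have g1 : (3 : Int) < PySem.Str.len text := by omega
      have g2 : (3 : Int) < PySem.Str.len completion := by omega
      simp only [ht, hc, g1, g2, decide_true, decide_false, Bool.or_self, Bool.false_or,
        Bool.true_and, if_false]
      rw [char_sets_eq]
      simp

-- ===== VERDICT (by name: the statement is the Claim_ definition above) =====
theorem is_repeated_text_spec : Claim_equal_is_repeated_text := by
  intro text completion _
  unfold Spec_is_repeated_text is_repeated_text is_repeated_text_alt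
  by_cases h0 : (text == "" || completion == "") = true
  · simp [h0]
  · simp only [Bool.not_eq_true] at h0
    simp only [h0, Bool.false_eq_true, if_false]
    rw [tri_eq, line_check_eq, char_eq]
    cases hq : (PySem.Str.strip text == PySem.Str.strip completion) <;>
      cases h2 : sharesTrigram (PySem.Str.split₀ text) (PySem.Str.split₀ completion) <;>
      cases h3 : tailLinesIn (PySem.Str.strip text) (PySem.Str.strip completion) <;>
      cases h4 : singleCharEcho text completion <;>
      simp [hq, h2, h3, h4]
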